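-- pv_equiv track=rewrite | github.com/gremos/Semantic_DB_RAG | db/discovery.py | _guess_use_case
-- ===== SOURCE A (Python) =====
-- from typing import List, Optional, Dict, Any, Tuple
--
-- def _guess_use_case(pattern: str, columns: List[str]) -> str:
--     """Guess what business question this view answers"""
--
--     use_cases = {
--         "customer_payment_analysis": "Analyze customer payment history, amounts, and payment behavior",
--         "customer_order_analysis": "Analyze customer ordering patterns and purchase history",
--         "financial_reporting": "Generate financial reports, revenue analysis, and payment summaries",
--         "customer_analysis": "Analyze customer information, demographics, and relationships",
--         "payment_analysis": "Analyze payment transactions, amounts, and payment methods",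
--         "order_analysis": "Analyze order volumes, patterns, and sales performance",
--         "general_reporting": "General business reporting and data analysis"
--     }
--
--     base_use_case = use_cases.get(pattern, "Data analysis and reporting")
--
--     # Enhance based on column names
--     column_hints = []
--     column_names_lower = [c.lower() for c in columns]
--
--     if any('total' in c or 'sum' in c or 'amount' in c for c in column_names_lower):
--         column_hints.append("with totals/amounts")
--     if any('count' in c or 'number' in c for c in column_names_lower):
--         column_hints.append("with counts")
--     if any('date' in c or 'month' in c or 'year' in c for c in column_names_lower):
--         column_hints.append("over time periods")
--
--     if column_hints:
--         base_use_case += " " + ", ".join(column_hints)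
--
--     return base_use_case
-- ===== SOURCE B (Python) =====
-- def _guess_use_case(pattern, columns):
--     """Guess what business question this view answers (single-pass flag version)"""
--     use_cases = {
--         "customer_payment_analysis": "Analyze customer payment history, amounts, and payment behavior",
--         "customer_order_analysis": "Analyze customer ordering patterns and purchase history",
--         "financial_reporting": "Generate financial reports, revenue analysis, and payment summaries",
--         "customer_analysis": "Analyze customer information, demographics, and relationships",
--         "payment_analysis": "Analyze payment transactions, amounts, and payment methods",
--         "order_analysis": "Analyze order volumes, patterns, and sales performance",
--         "general_reporting": "General business reporting and data analysis"
--     }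
--     base_use_case = use_cases.get(pattern, "Data analysis and reporting")
--
--     amounts = counts = time_flag = False
--     for col in columns:
--         c = col.lower()
--         amounts = amounts or 'total' in c or 'sum' in c or 'amount' in c
--         counts = counts or 'count' in c or 'number' in c
--         time_flag = time_flag or 'date' in c or 'month' in c or 'year' in c
--
--     hints = []
--     if amounts:
--         hints.append("with totals/amounts")
--     if counts:
--         hints.append("with counts")
--     if time_flag:
--         hints.append("over time periods")
--
--     return base_use_case + " " + ", ".join(hints) if hints else base_use_case
-- ===== Notes on version B (the rewrite author's own statement) =====
-- stated objective: alternative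
-- what changed: Replaced A's three independent any(...) scans over the lowercased columns with a single pass that maintains three boolean flags and emits the hints in the same fixed order.
import Mathlib
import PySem

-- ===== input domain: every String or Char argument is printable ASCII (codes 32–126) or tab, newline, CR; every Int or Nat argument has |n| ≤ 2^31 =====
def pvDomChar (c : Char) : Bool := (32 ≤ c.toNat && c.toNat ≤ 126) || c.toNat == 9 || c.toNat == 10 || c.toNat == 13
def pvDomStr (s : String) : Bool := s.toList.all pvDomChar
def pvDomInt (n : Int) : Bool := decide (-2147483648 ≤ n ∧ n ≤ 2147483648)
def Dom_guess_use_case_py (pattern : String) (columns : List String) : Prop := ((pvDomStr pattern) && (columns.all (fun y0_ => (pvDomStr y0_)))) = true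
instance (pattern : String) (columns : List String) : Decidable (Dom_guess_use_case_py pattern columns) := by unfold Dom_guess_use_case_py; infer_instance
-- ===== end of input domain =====

-- B replaces A's three separate any(...) scans over the lowered columns by one pass that
-- maintains three boolean flags, then emits the hints in the same fixed order (objective: alternative decomposition).

-- shared literal: the use_cases dict both Pythons spell out
def pvUseCases : PySem.Dict String String :=
  PySem.Dict.ofList [
    ("customer_payment_analysis", "Analyze customer payment history, amounts, and payment behavior"),
    ("customer_order_analysis", "Analyze customer ordering patterns and purchase history"),
    ("financial_reporting", "Generate financial reports, revenue analysis, and payment summaries"),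
    ("customer_analysis", "Analyze customer information, demographics, and relationships"),
    ("payment_analysis", "Analyze payment transactions, amounts, and payment methods"),
    ("order_analysis", "Analyze order volumes, patterns, and sales performance"),
    ("general_reporting", "General business reporting and data analysis")]

-- ===== PORT A =====
def guess_use_case_py (pattern : String) (columns : List String) : String :=
  let base_use_case := pvUseCases.getD pattern "Data analysis and reporting"
  let column_names_lower := columns.map PySem.Str.lower
  let column_hints : List String := []
  let column_hints := if column_names_lower.any (fun c =>
      PySem.Str.isIn "total" c || PySem.Str.isIn "sum" c || PySem.Str.isIn "amount" c)
    then column_hints ++ ["with totals/amounts"] else column_hints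
  let column_hints := if column_names_lower.any (fun c =>
      PySem.Str.isIn "count" c || PySem.Str.isIn "number" c)
    then column_hints ++ ["with counts"] else column_hints
  let column_hints := if column_names_lower.any (fun c =>
      PySem.Str.isIn "date" c || PySem.Str.isIn "month" c || PySem.Str.isIn "year" c)
    then column_hints ++ ["over time periods"] else column_hints
  if column_hints ≠ [] then base_use_case ++ " " ++ PySem.Str.join ", " column_hints
  else base_use_case

-- ===== PORT B =====
def guess_use_case_py_alt (pattern : String) (columns : List String) : String :=
  let base_use_case := pvUseCases.getD pattern "Data analysis and reporting"
  let flags := columns.foldl (fun (f : Bool × Bool × Bool) col =>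
      let c := PySem.Str.lower col
      (f.1 || PySem.Str.isIn "total" c || PySem.Str.isIn "sum" c || PySem.Str.isIn "amount" c,
       f.2.1 || PySem.Str.isIn "count" c || PySem.Str.isIn "number" c,
       f.2.2 || PySem.Str.isIn "date" c || PySem.Str.isIn "month" c || PySem.Str.isIn "year" c))
    (false, false, false)
  let hints := (if flags.1 then ["with totals/amounts"] else [])
            ++ (if flags.2.1 then ["with counts"] else [])
            ++ (if flags.2.2 then ["over time periods"] else [])
  if hints.isEmpty then base_use_case
  else base_use_case ++ " " ++ PySem.Str.join ", " hints

-- ===== PRECONDITION & SPEC =====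
def Spec_guess_use_case_py (pattern : String) (columns : List String) (out : String) : Prop := out = guess_use_case_py_alt pattern columns
instance (pattern : String) (columns : List String) (out : String) : Decidable (Spec_guess_use_case_py pattern columns out) := by unfold Spec_guess_use_case_py; infer_instance

-- ===== CLAIM (what is proved, stated in full; the proofs are below) =====
def Claim_equal_guess_use_case_py : Prop := ∀ (pattern : String) (columns : List String), Dom_guess_use_case_py pattern columns → Spec_guess_use_case_py pattern columns (guess_use_case_py pattern columns)

-- ===== LEMMAS AND PROOFS =====

-- B's single fold of the three flags computes exactly the three any-scans A performs
lemma foldl_flags (cols : List String) (a b c : Bool) :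
    cols.foldl (fun (f : Bool × Bool × Bool) col =>
      let c := PySem.Str.lower col
      (f.1 || PySem.Str.isIn "total" c || PySem.Str.isIn "sum" c || PySem.Str.isIn "amount" c,
       f.2.1 || PySem.Str.isIn "count" c || PySem.Str.isIn "number" c,
       f.2.2 || PySem.Str.isIn "date" c || PySem.Str.isIn "month" c || PySem.Str.isIn "year" c))
      (a, b, c) =
    (a || cols.any (fun col => PySem.Str.isIn "total" (PySem.Str.lower col) || PySem.Str.isIn "sum" (PySem.Str.lower col) || PySem.Str.isIn "amount" (PySem.Str.lower col)),
     b || cols.any (fun col => PySem.Str.isIn "count" (PySem.Str.lower col) || PySem.Str.isIn "number" (PySem.Str.lower col)),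
     c || cols.any (fun col => PySem.Str.isIn "date" (PySem.Str.lower col) || PySem.Str.isIn "month" (PySem.Str.lower col) || PySem.Str.isIn "year" (PySem.Str.lower col))) := by
  induction cols generalizing a b c with
  | nil => simp
  | cons x xs ih =>
    simp only [List.foldl_cons, List.any_cons, ih]
    simp [Bool.or_assoc]

-- ===== VERDICT (by name: the statement is the Claim_ definition above) =====
theorem guess_use_case_py_spec : Claim_equal_guess_use_case_py := by
  intro pattern columns _
  unfold Spec_guess_use_case_py guess_use_case_py guess_use_case_py_alt
  rw [foldl_flags]
  simp only [List.any_map, Function.comp_def, Bool.false_or]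
  cases h1 : columns.any (fun col => PySem.Str.isIn "total" (PySem.Str.lower col) || PySem.Str.isIn "sum" (PySem.Str.lower col) || PySem.Str.isIn "amount" (PySem.Str.lower col)) <;>
  cases h2 : columns.any (fun col => PySem.Str.isIn "count" (PySem.Str.lower col) || PySem.Str.isIn "number" (PySem.Str.lower col)) <;>
  cases h3 : columns.any (fun col => PySem.Str.isIn "date" (PySem.Str.lower col) || PySem.Str.isIn "month" (PySem.Str.lower col) || PySem.Str.isIn "year" (PySem.Str.lower col)) <;>
  simp
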